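-- pv_equiv track=rewrite | github.com/pypi-data/pypi-mirror-42 | packages/pyscience/pyscience-0.1.0.dev4.tar.gz/pyscience-0.1.0.dev4/pyscience/algebra/monomial.py | sustraer
-- ===== SOURCE A (Python) =====
-- def sustraer(expr1, expr2):
--     """ Simplifica la expresion 1 con respeto a la 2 como si fuese una division. Ejemplo:
--
--         >>> sustraer('xx','xy')
--         'xy'
--         >>> sustraer('xyz', 'xyz')
--         ''
--         >>>
--     """
--     R={}
--     c1 = count_variables(expr1)
--     c2 = count_variables(expr2)
--
--     for x in c1.keys():
--         if x in c2:
--             R[x]=c1[x]-c2[x]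
--             if R[x] < 0:
--                 R[x] = 0
--         else:
--             R[x]=c1[x]
--     for x in c2.keys():
--         if x in R:
--             if c2[x]-c1[x] > 0:
--                 R[x] = c2[x]-c1[x]
--         else:
--             R[x]=c2[x]
--
--     # Elimina ceros
--     RC={}
--     for x in R.keys():
--         if R[x] != 0:
--             RC[x]=R[x]
--
--     return RC
--
-- def count_variables(expr):
--     """ Cuenta y agrupa las variables del mismo nombre. Devuelve un
--         diccionario con el numero de veces que aparece cada una
--
--         >>> count_variables('xxy')
--         {
--             'x': 2,
--             'y': 1
--         }
--         >>>
--     """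
--     R = {}
--     variables = []
--
--     for x in list(expr):
--         if not x in variables:
--             variables.append(x)
--
--     for x in variables:
--         R[x] = expr.count(x)
--
--     return R
-- ===== SOURCE B (Python) =====
-- def sustraer(expr1, expr2):
--     c1 = {}
--     for ch in expr1:
--         c1[ch] = c1.get(ch, 0) + 1
--     c2 = {}
--     for ch in expr2:
--         c2[ch] = c2.get(ch, 0) + 1
--     out = {}
--     for ch in dict.fromkeys(expr1 + expr2):
--         d = abs(c1.get(ch, 0) - c2.get(ch, 0))
--         if d != 0:
--             out[ch] = d
--     return out
-- ===== Notes on version B (the rewrite author's own statement) =====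
-- stated objective: simpler
-- what changed: Replaces the repeated str.count scans and the two conditional clamping loops plus a zero-removal pass with single-pass counting dicts and one pass over the deduplicated characters taking abs(c1-c2) and keeping nonzero entries.
import Mathlib
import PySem

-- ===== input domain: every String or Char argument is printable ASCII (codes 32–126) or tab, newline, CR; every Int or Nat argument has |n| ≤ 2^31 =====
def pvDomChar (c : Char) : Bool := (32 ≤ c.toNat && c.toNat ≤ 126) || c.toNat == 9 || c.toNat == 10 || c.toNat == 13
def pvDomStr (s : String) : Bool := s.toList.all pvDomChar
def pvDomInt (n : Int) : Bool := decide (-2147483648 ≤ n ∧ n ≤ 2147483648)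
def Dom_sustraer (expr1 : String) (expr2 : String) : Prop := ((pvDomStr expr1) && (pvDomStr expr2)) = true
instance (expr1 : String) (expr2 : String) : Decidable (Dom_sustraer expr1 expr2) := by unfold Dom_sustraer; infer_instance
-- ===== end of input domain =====

-- B replaces A's repeated str.count scans, two clamping loops and zero-removal pass by
-- single-pass counting dicts and one abs-difference pass over the deduplicated characters.

-- ===== PORT A =====
-- count_variables: dedup the characters in order, then map each to expr.count(x).
-- (Python dict indexing d[x] below always hits an existing key, so it is ported as getD _ 0.)
def pvCountVariables (expr : List Char) : PySem.Dict Char Int :=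
  let vars := expr.foldl (fun vs x => if vs.contains x then vs else vs ++ [x]) ([] : List Char)
  vars.foldl (fun R x => R.insert x ((expr.count x : Int))) PySem.Dict.empty

def sustraer (expr1 : String) (expr2 : String) : List (String × Int) :=
  let c1 := pvCountVariables expr1.toList
  let c2 := pvCountVariables expr2.toList
  let R1 := c1.keys.foldl (fun R x =>
      if c2.contains x then
        let R' := R.insert x (c1.getD x 0 - c2.getD x 0)
        if R'.getD x 0 < 0 then R'.insert x 0 else R'
      else R.insert x (c1.getD x 0)) PySem.Dict.empty
  let R2 := c2.keys.foldl (fun R x =>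
      if R.contains x then
        if c2.getD x 0 - c1.getD x 0 > 0 then R.insert x (c2.getD x 0 - c1.getD x 0) else R
      else R.insert x (c2.getD x 0)) R1
  let RC := R2.keys.foldl (fun (RC : PySem.Dict Char Int) x =>
      if R2.getD x 0 ≠ 0 then RC.insert x (R2.getD x 0) else RC) (PySem.Dict.empty : PySem.Dict Char Int)
  RC.items.map (fun p => (String.singleton p.1, p.2))

-- ===== PORT B =====
def sustraer_alt (expr1 : String) (expr2 : String) : List (String × Int) :=
  let c1 := expr1.toList.foldl (fun d ch => d.insert ch (d.getD ch 0 + 1)) PySem.Dict.empty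
  let c2 := expr2.toList.foldl (fun d ch => d.insert ch (d.getD ch 0 + 1)) PySem.Dict.empty
  let out := (PySem.List.dedup (expr1.toList ++ expr2.toList)).foldl (fun (out : PySem.Dict Char Int) ch =>
      let d := |c1.getD ch 0 - c2.getD ch 0|
      if d ≠ 0 then out.insert ch d else out) (PySem.Dict.empty : PySem.Dict Char Int)
  out.items.map (fun p => (String.singleton p.1, p.2))

-- ===== PRECONDITION & SPEC =====
def Spec_sustraer (expr1 : String) (expr2 : String) (out : List (String × Int)) : Prop := out = sustraer_alt expr1 expr2
instance (expr1 : String) (expr2 : String) (out : List (String × Int)) : Decidable (Spec_sustraer expr1 expr2 out) := by unfold Spec_sustraer; infer_instance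

-- ===== CLAIM (what is proved, stated in full; the proofs are below) =====
def Claim_equal_sustraer : Prop := ∀ (expr1 : String) (expr2 : String), Dom_sustraer expr1 expr2 → Spec_sustraer expr1 expr2 (sustraer expr1 expr2)

-- ===== LEMMAS AND PROOFS =====

-- a conditional fresh-key insertion loop appends the filtered entries
lemma items_filter_fold (p : Char → Prop) [DecidablePred p] (v : Char → Int) :
    ∀ (l : List Char) (d : PySem.Dict Char Int), l.Nodup → (∀ x ∈ l, d.contains x = false) →
      (l.foldl (fun d x => if p x then d.insert x (v x) else d) d).items
        = d.items ++ (l.filter (fun x => decide (p x))).map (fun x => (x, v x)) := by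
  intro l
  induction l with
  | nil => intro d _ _; simp
  | cons x t ih =>
    intro d hnd hf
    obtain ⟨hx, ht⟩ := List.nodup_cons.mp hnd
    have hfresh : ∀ y ∈ t, (d.insert x (v x)).contains y = false := by
      intro y hy
      rw [PySem.Dict.contains_insert]
      have hne : (y == x) = false := by
        simp only [beq_eq_false_iff_ne, ne_eq]
        rintro rfl; exact hx hy
      simp [hne, hf y (List.mem_cons_of_mem _ hy)]
    simp only [List.foldl_cons]
    by_cases hp : p x
    · rw [if_pos hp, ih _ ht hfresh,
        PySem.Dict.items_insert_of_not_contains d (v x) (hf x (List.mem_cons_self))]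
      simp [hp]
    · rw [if_neg hp, ih _ ht (fun y hy => hf y (List.mem_cons_of_mem _ hy))]
      simp [hp]

-- the running dedup loop over any start set
lemma foldl_setadd_eq (l : List Char) :
    ∀ s : PySem.Set Char, List.foldl PySem.Set.add s l
      = s ++ (PySem.List.dedup l).filter (fun x => !s.contains x) := by
  induction l with
  | nil => intro s; simp [PySem.List.dedup_eq_ofList, PySem.Set.ofList_eq_foldl]
  | cons x t ih =>
    intro s
    have hded : PySem.List.dedup (x :: t)
        = [x] ++ (PySem.List.dedup t).filter (fun y => !([x] : List Char).contains y) := by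
      rw [PySem.List.dedup_eq_ofList, PySem.Set.ofList_eq_foldl, List.foldl_cons]
      exact ih [x]
    rw [List.foldl_cons, ih (PySem.Set.add s x), hded]
    by_cases hc : s.contains x = true
    · have hmem : x ∈ s := by simpa using hc
      have hadd : PySem.Set.add s x = s := by simp [PySem.Set.add, hmem]
      rw [hadd]
      simp only [List.cons_append, List.nil_append, List.filter_cons, List.filter_filter]
      have hx : (!s.contains x) = false := by simp [hmem]
      rw [hx]
      simp only [Bool.false_eq_true, if_false]
      congr 1
      apply List.filter_congr
      intro y _
      by_cases hyx : y = x
      · subst hyx; simp [hmem]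
      · simp [List.contains_eq_mem, hyx]
    · have hmem : x ∉ s := by simpa using hc
      have hadd : PySem.Set.add s x = s ++ [x] := by simp [PySem.Set.add, hmem]
      rw [hadd]
      simp only [List.cons_append, List.nil_append, List.filter_cons, List.filter_filter]
      have hx : (!s.contains x) = true := by simp [hmem]
      rw [hx]
      simp only [if_true, List.append_assoc, List.singleton_append]
      congr 2
      apply List.filter_congr
      intro y _
      by_cases hyx : y = x
      · subst hyx; simp
      · simp [List.contains_eq_mem, hyx]

lemma dedup_append_char (l1 l2 : List Char) :
    PySem.List.dedup (l1 ++ l2)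
      = PySem.List.dedup l1 ++ (PySem.List.dedup l2).filter (fun x => !(PySem.List.dedup l1).contains x) := by
  rw [PySem.List.dedup_eq_ofList (l1 ++ l2), PySem.Set.ofList_eq_foldl, List.foldl_append,
    ← PySem.Set.ofList_eq_foldl, ← PySem.List.dedup_eq_ofList, foldl_setadd_eq]
  rfl

-- a dict whose items are a Nodup keyed map table reads back pointwise
lemma keys_of_items_map (d : PySem.Dict Char Int) (l : List Char) (f : Char → Int)
    (h : d.items = l.map (fun x => (x, f x))) : d.keys = l := by
  show d.items.map Prod.fst = l
  rw [h, List.map_map, show (Prod.fst ∘ fun x => (x, f x)) = id from rfl, List.map_id]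

lemma getD_of_items_map (d : PySem.Dict Char Int) (l : List Char) (f : Char → Int)
    (h : d.items = l.map (fun x => (x, f x))) (hl : l.Nodup) (x : Char) :
    d.getD x 0 = if x ∈ l then f x else 0 := by
  have hk : d.keys = l := keys_of_items_map d l f h
  by_cases hm : x ∈ l
  · rw [if_pos hm]
    exact PySem.Dict.getD_of_mem_items d (by rw [h]; exact List.mem_map_of_mem hm) (hk ▸ hl) 0
  · rw [if_neg hm, PySem.Dict.getD_of_not_contains d 0
      (by rw [PySem.Dict.contains_eq_decide_mem_keys, hk]; simp [hm])]

-- count_variables characterised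
lemma cv_items (l : List Char) :
    (pvCountVariables l).items = (PySem.List.dedup l).map (fun x => (x, (l.count x : Int))) := by
  show ((l.foldl (fun vs x => if vs.contains x then vs else vs ++ [x]) ([] : List Char)).foldl
      (fun R x => R.insert x ((l.count x : Int))) PySem.Dict.empty).items = _
  have hv : l.foldl (fun vs x => if vs.contains x then vs else vs ++ [x]) ([] : List Char)
      = PySem.List.dedup l := by
    rw [PySem.List.dedup_eq_ofList, PySem.Set.ofList_eq_foldl]; rfl
  rw [hv, PySem.Dict.items_foldl_insert_fresh (PySem.List.dedup l) (fun x => x)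
    (fun x => (l.count x : Int)) PySem.Dict.empty (by simp)
    (by simpa using PySem.List.nodup_dedup l)]
  simp [show PySem.Dict.empty.items = ([] : List (Char × Int)) from rfl]

lemma cv_keys (l : List Char) : (pvCountVariables l).keys = PySem.List.dedup l :=
  keys_of_items_map _ _ _ (cv_items l)

lemma cv_getD (l : List Char) (x : Char) : (pvCountVariables l).getD x 0 = (l.count x : Int) := by
  rw [getD_of_items_map _ _ _ (cv_items l) (PySem.List.nodup_dedup l) x]
  by_cases hm : x ∈ l
  · simp [hm]
  · simp [hm, List.count_eq_zero_of_not_mem hm]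

-- the per-variable value after A's loops, and the common absolute difference
def pvV1 (c1 c2 : PySem.Dict Char Int) (x : Char) : Int :=
  if c2.contains x then
    (if c1.getD x 0 - c2.getD x 0 < 0 then 0 else c1.getD x 0 - c2.getD x 0)
  else c1.getD x 0

def pvAbsDiff (l1 l2 : List Char) (x : Char) : Int := |(l1.count x : Int) - (l2.count x : Int)|

-- A's first loop body is a single keyed insert
lemma stepA_eq (c1 c2 R : PySem.Dict Char Int) (x : Char) :
    (if c2.contains x then
        (let R' := R.insert x (c1.getD x 0 - c2.getD x 0)
         if R'.getD x 0 < 0 then R'.insert x 0 else R')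
      else R.insert x (c1.getD x 0))
    = R.insert x (pvV1 c1 c2 x) := by
  simp only [PySem.Dict.getD_insert_self, PySem.Dict.insert_insert_self, pvV1]
  split_ifs <;> rfl

lemma R1_items (c1 c2 : PySem.Dict Char Int) (hnd : c1.keys.Nodup) :
    (c1.keys.foldl (fun R x =>
        if c2.contains x then
          (let R' := R.insert x (c1.getD x 0 - c2.getD x 0)
           if R'.getD x 0 < 0 then R'.insert x 0 else R')
        else R.insert x (c1.getD x 0)) PySem.Dict.empty).items
      = c1.keys.map (fun x => (x, pvV1 c1 c2 x)) := by
  rw [PySem.List.foldl_congr_mem (l := c1.keys) (init := (PySem.Dict.empty : PySem.Dict Char Int))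
    (f := fun R x =>
      if c2.contains x then
        (let R' := R.insert x (c1.getD x 0 - c2.getD x 0)
         if R'.getD x 0 < 0 then R'.insert x 0 else R')
      else R.insert x (c1.getD x 0))
    (g := fun R x => R.insert x (pvV1 c1 c2 x))
    (fun acc x _ => stepA_eq c1 c2 acc x)]
  rw [PySem.Dict.items_foldl_insert_fresh c1.keys (fun x => x) (pvV1 c1 c2) PySem.Dict.empty
    (by simp) (by simp; exact hnd)]
  simp [show PySem.Dict.empty.items = ([] : List (Char × Int)) from rfl]

-- A's second loop: keys and pointwise value
lemma loop2_keys (g h : Char → Int) :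
    ∀ (l : List Char) (d : PySem.Dict Char Int), l.Nodup →
      (l.foldl (fun d x => if d.contains x then
          (if g x > 0 then d.insert x (g x) else d) else d.insert x (h x)) d).keys
        = d.keys ++ l.filter (fun x => !d.contains x) := by
  intro l
  induction l with
  | nil => intro d _; simp
  | cons y t ih =>
    intro d hnd
    obtain ⟨hy, ht⟩ := List.nodup_cons.mp hnd
    have hcongr : ∀ (d' : PySem.Dict Char Int) (v : Int), t.filter (fun x => !(d'.insert y v).contains x)
        = t.filter (fun x => !d'.contains x) := by
      intro d' v
      apply List.filter_congr
      intro z hz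
      have hne : (z == y) = false := by
        simp only [beq_eq_false_iff_ne, ne_eq]; rintro rfl; exact hy hz
      rw [PySem.Dict.contains_insert, hne]
      simp
    simp only [List.foldl_cons]
    by_cases hc : d.contains y = true
    · by_cases hg : g y > 0
      · rw [if_pos hc, if_pos hg, ih _ ht, PySem.Dict.keys_insert_of_contains d (g y) hc, hcongr]
        simp [hc]
      · rw [if_pos hc, if_neg hg, ih _ ht]
        simp [hc]
    · have hcf : d.contains y = false := by simpa using hc
      rw [if_neg (by simp [hcf]), ih _ ht, PySem.Dict.keys_insert_of_not_contains d (h y) hcf, hcongr]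
      simp [hcf]

lemma loop2_getD (g h : Char → Int) :
    ∀ (l : List Char) (d : PySem.Dict Char Int) (x : Char), l.Nodup →
      (l.foldl (fun d x => if d.contains x then
          (if g x > 0 then d.insert x (g x) else d) else d.insert x (h x)) d).getD x 0
        = if x ∈ l then (if d.contains x then (if g x > 0 then g x else d.getD x 0) else h x)
          else d.getD x 0 := by
  intro l
  induction l with
  | nil => intro d x _; simp
  | cons y t ih =>
    intro d x hnd
    obtain ⟨hy, ht⟩ := List.nodup_cons.mp hnd
    simp only [List.foldl_cons]
    by_cases hxy : x = y
    · subst hxy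
      have hxt : x ∉ t := hy
      by_cases hc : d.contains x = true
      · by_cases hg : g x > 0
        · rw [if_pos hc, if_pos hg, ih _ _ ht, if_neg hxt, PySem.Dict.getD_insert_self]
          simp [hc, hg]
        · rw [if_pos hc, if_neg hg, ih _ _ ht, if_neg hxt]
          simp [hc, hg]
      · rw [if_neg hc, ih _ _ ht, if_neg hxt, PySem.Dict.getD_insert_self]
        simp [hc]
    · have hmem : (x ∈ y :: t) = (x ∈ t) := by
        simp [List.mem_cons, hxy]
      have hne : (x == y) = false := by simp [hxy]
      by_cases hc : d.contains y = true
      · by_cases hg : g y > 0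
        · rw [if_pos hc, if_pos hg, ih _ _ ht]
          rw [PySem.Dict.contains_insert, hne, PySem.Dict.getD_insert, if_neg hxy]
          simp [hmem]
        · rw [if_pos hc, if_neg hg, ih _ _ ht]
          simp [hmem]
      · rw [if_neg hc, ih _ _ ht]
        rw [PySem.Dict.contains_insert, hne, PySem.Dict.getD_insert, if_neg hxy]
        simp [hmem]


-- A's whole pipeline, over abstract counting dicts
lemma A_core (l1 l2 : List Char) (c1 c2 R1 R2 : PySem.Dict Char Int)
    (h1k : c1.keys = PySem.List.dedup l1) (h2k : c2.keys = PySem.List.dedup l2)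
    (h1g : ∀ x, c1.getD x 0 = (l1.count x : Int)) (h2g : ∀ x, c2.getD x 0 = (l2.count x : Int))
    (hR1 : R1 = c1.keys.foldl (fun R x =>
        if c2.contains x then
          (let R' := R.insert x (c1.getD x 0 - c2.getD x 0)
           if R'.getD x 0 < 0 then R'.insert x 0 else R')
        else R.insert x (c1.getD x 0)) PySem.Dict.empty)
    (hR2 : R2 = c2.keys.foldl (fun R x =>
        if R.contains x then
          (if c2.getD x 0 - c1.getD x 0 > 0 then R.insert x (c2.getD x 0 - c1.getD x 0) else R)
        else R.insert x (c2.getD x 0)) R1) :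
    ((R2.keys.foldl (fun (RC : PySem.Dict Char Int) x =>
        if R2.getD x 0 ≠ 0 then RC.insert x (R2.getD x 0) else RC) PySem.Dict.empty).items).map
          (fun p => (String.singleton p.1, p.2))
      = ((PySem.List.dedup (l1 ++ l2)).filter (fun x => decide (pvAbsDiff l1 l2 x ≠ 0))).map
          (fun x => (String.singleton x, pvAbsDiff l1 l2 x)) := by
  have hnd1 : c1.keys.Nodup := h1k ▸ PySem.List.nodup_dedup l1
  have hnd2 : c2.keys.Nodup := h2k ▸ PySem.List.nodup_dedup l2
  have hR1i : R1.items = c1.keys.map (fun x => (x, pvV1 c1 c2 x)) := by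
    rw [hR1]; exact R1_items c1 c2 hnd1
  have hR1k : R1.keys = PySem.List.dedup l1 := by
    rw [keys_of_items_map R1 c1.keys (pvV1 c1 c2) hR1i, h1k]
  have hR1g : ∀ x, R1.getD x 0 = if x ∈ PySem.List.dedup l1 then pvV1 c1 c2 x else 0 := by
    intro x
    rw [getD_of_items_map R1 c1.keys (pvV1 c1 c2) hR1i hnd1 x, h1k]
  have hR1c : ∀ x, R1.contains x = (PySem.List.dedup l1).contains x := by
    intro x
    rw [PySem.Dict.contains_eq_decide_mem_keys, hR1k, List.contains_eq_mem]
  have hR2k : R2.keys = PySem.List.dedup (l1 ++ l2) := by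
    rw [hR2, loop2_keys (fun x => c2.getD x 0 - c1.getD x 0) (fun x => c2.getD x 0) c2.keys R1 hnd2,
      hR1k, h2k, dedup_append_char]
    congr 1
    apply List.filter_congr
    intro x _
    rw [hR1c]
  have hR2g : ∀ x, R2.getD x 0 = pvAbsDiff l1 l2 x := by
    intro x
    rw [hR2, loop2_getD (fun x => c2.getD x 0 - c1.getD x 0) (fun x => c2.getD x 0) c2.keys R1 x hnd2]
    have hmem2 : (x ∈ c2.keys) = (x ∈ l2) := by
      rw [h2k]; simp
    have hc2c : c2.contains x = decide (x ∈ l2) := by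
      rw [PySem.Dict.contains_eq_decide_mem_keys, h2k]
      simp
    have habs : ∀ a b : Int, 0 ≤ a → 0 ≤ b →
        (if b - a > 0 then b - a else if a - b < 0 then 0 else a - b) = |a - b| := by
      intro a b _ _
      rcases abs_cases (a - b) with ⟨h1, h2⟩ | ⟨h1, h2⟩ <;> split_ifs <;> omega
    have ha : (0 : Int) ≤ (l1.count x : Int) := Int.natCast_nonneg _
    have hb : (0 : Int) ≤ (l2.count x : Int) := Int.natCast_nonneg _
    by_cases m2 : x ∈ l2
    · rw [if_pos (by rw [hmem2]; exact m2)]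
      by_cases m1 : x ∈ l1
      · have hd1 : x ∈ PySem.List.dedup l1 := (PySem.List.mem_dedup l1 x).mpr m1
        have hR1cx : R1.contains x = true := by
          rw [hR1c, List.contains_eq_mem]; exact decide_eq_true hd1
        rw [if_pos hR1cx, hR1g x, if_pos hd1]
        simp only [pvV1, hc2c, h1g, h2g, pvAbsDiff, m2, decide_true, if_true]
        exact habs _ _ ha hb
      · have hd1 : x ∉ PySem.List.dedup l1 := fun h => m1 ((PySem.List.mem_dedup l1 x).mp h)
        have hR1cx : ¬ (R1.contains x = true) := by
          rw [hR1c, List.contains_eq_mem]; simp [m1]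
        rw [if_neg hR1cx, h2g]
        simp only [pvAbsDiff, List.count_eq_zero_of_not_mem m1, Nat.cast_zero, zero_sub, abs_neg]
        rw [abs_of_nonneg hb]
    · rw [if_neg (by rw [hmem2]; exact m2), hR1g x]
      by_cases m1 : x ∈ l1
      · have hd1 : x ∈ PySem.List.dedup l1 := (PySem.List.mem_dedup l1 x).mpr m1
        rw [if_pos hd1]
        simp only [pvV1, hc2c, m2, decide_false, Bool.false_eq_true, if_false, h1g]
        simp only [pvAbsDiff, List.count_eq_zero_of_not_mem m2, Nat.cast_zero, sub_zero]
        rw [abs_of_nonneg ha]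
      · have hd1 : x ∉ PySem.List.dedup l1 := fun h => m1 ((PySem.List.mem_dedup l1 x).mp h)
        rw [if_neg hd1]
        simp [pvAbsDiff, List.count_eq_zero_of_not_mem m1, List.count_eq_zero_of_not_mem m2]
  rw [items_filter_fold (fun x => R2.getD x 0 ≠ 0) (fun x => R2.getD x 0) R2.keys PySem.Dict.empty
    (hR2k ▸ PySem.List.nodup_dedup (l1 ++ l2)) (by simp), hR2k]
  rw [show PySem.Dict.empty.items = ([] : List (Char × Int)) from rfl, List.nil_append, List.map_map]
  rw [List.filter_congr (fun x _ => by rw [hR2g x])]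
  apply List.map_congr_left
  intro x _
  simp [Function.comp, hR2g x]

-- B's pipeline
lemma B_core (l1 l2 : List Char) :
    (((PySem.List.dedup (l1 ++ l2)).foldl (fun (out : PySem.Dict Char Int) ch =>
        let d := |(l1.foldl (fun d ch => d.insert ch (d.getD ch 0 + 1)) PySem.Dict.empty).getD ch 0
                  - (l2.foldl (fun d ch => d.insert ch (d.getD ch 0 + 1)) PySem.Dict.empty).getD ch 0|
        if d ≠ 0 then out.insert ch d else out) PySem.Dict.empty).items).map
          (fun p => (String.singleton p.1, p.2))
      = ((PySem.List.dedup (l1 ++ l2)).filter (fun x => decide (pvAbsDiff l1 l2 x ≠ 0))).map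
          (fun x => (String.singleton x, pvAbsDiff l1 l2 x)) := by
  rw [PySem.Dict.foldl_insert_getD_add_one_eq_counter l1,
    PySem.Dict.foldl_insert_getD_add_one_eq_counter l2]
  simp only [PySem.Dict.getD_counter]
  rw [items_filter_fold (fun ch => |(l1.count ch : Int) - (l2.count ch : Int)| ≠ 0)
    (fun ch => |(l1.count ch : Int) - (l2.count ch : Int)|) (PySem.List.dedup (l1 ++ l2))
    PySem.Dict.empty (PySem.List.nodup_dedup (l1 ++ l2)) (by simp)]
  rw [show PySem.Dict.empty.items = ([] : List (Char × Int)) from rfl, List.nil_append, List.map_map]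
  simp [pvAbsDiff, Function.comp]

-- ===== VERDICT (by name: the statement is the Claim_ definition above) =====
theorem sustraer_spec : Claim_equal_sustraer := by
  intro expr1 expr2 _
  unfold Spec_sustraer
  show sustraer expr1 expr2 = sustraer_alt expr1 expr2
  have hA : sustraer expr1 expr2
      = ((PySem.List.dedup (expr1.toList ++ expr2.toList)).filter
          (fun x => decide (pvAbsDiff expr1.toList expr2.toList x ≠ 0))).map
          (fun x => (String.singleton x, pvAbsDiff expr1.toList expr2.toList x)) := by
    simp only [sustraer]
    exact A_core expr1.toList expr2.toList _ _ _ _ (cv_keys _) (cv_keys _) (cv_getD _) (cv_getD _)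
      rfl rfl
  have hB : sustraer_alt expr1 expr2
      = ((PySem.List.dedup (expr1.toList ++ expr2.toList)).filter
          (fun x => decide (pvAbsDiff expr1.toList expr2.toList x ≠ 0))).map
          (fun x => (String.singleton x, pvAbsDiff expr1.toList expr2.toList x)) := by
    simp only [sustraer_alt]
    exact B_core expr1.toList expr2.toList
  rw [hA, hB]
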